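-- pv_equiv track=rewrite | github.com/FabianLinden/BukaAmanzi | backend/app/etl/comprehensive_dws_scraper.py | _determine_province_from_code
-- ===== SOURCE A (Python) =====
-- def _determine_province_from_code(municipality_code: str) -> str:
--     """Determine province from municipality code"""
--     try:
--         # Province code mappings
--         province_codes = {
--             'WC': 'Western Cape', 'EC': 'Eastern Cape', 'NC': 'Northern Cape',
--             'FS': 'Free State', 'KZN': 'KwaZulu-Natal', 'NW': 'North West',
--             'GT': 'Gauteng', 'MP': 'Mpumalanga', 'LIM': 'Limpopo',
--             'CPT': 'Western Cape', 'JHB': 'Gauteng', 'ETH': 'KwaZulu-Natal',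
--             'TSH': 'Gauteng', 'EKU': 'Gauteng', 'BUF': 'Eastern Cape',
--             'MAN': 'Free State'
--         }
--
--         for code_prefix, province in province_codes.items():
--             if municipality_code.startswith(code_prefix):
--                 return province
--
--         # Try to determine from full code patterns
--         if municipality_code.startswith(('WC', 'CPT')):
--             return 'Western Cape'
--         elif municipality_code.startswith(('EC', 'BUF')):
--             return 'Eastern Cape'
--         elif municipality_code.startswith('NC'):
--             return 'Northern Cape'
--         elif municipality_code.startswith(('FS', 'MAN')):
--             return 'Free State'
--         elif municipality_code.startswith(('KZN', 'ETH')):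
--             return 'KwaZulu-Natal'
--         elif municipality_code.startswith('NW'):
--             return 'North West'
--         elif municipality_code.startswith(('GT', 'JHB', 'TSH', 'EKU')):
--             return 'Gauteng'
--         elif municipality_code.startswith('MP'):
--             return 'Mpumalanga'
--         elif municipality_code.startswith('LIM'):
--             return 'Limpopo'
--
--         return 'Unknown Province'
--
--     except Exception:
--         return 'Unknown Province'
-- ===== SOURCE B (Python) =====
-- # Two constant-time dict lookups (3-char keys, then 2-char keys) replace A's
-- # linear startswith scan; A's elif fallback is dead code (same prefixes) and is dropped.
-- _PROVINCES_3 = {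
--     'KZN': 'KwaZulu-Natal', 'LIM': 'Limpopo', 'CPT': 'Western Cape',
--     'JHB': 'Gauteng', 'ETH': 'KwaZulu-Natal', 'TSH': 'Gauteng',
--     'EKU': 'Gauteng', 'BUF': 'Eastern Cape', 'MAN': 'Free State',
-- }
-- _PROVINCES_2 = {
--     'WC': 'Western Cape', 'EC': 'Eastern Cape', 'NC': 'Northern Cape',
--     'FS': 'Free State', 'NW': 'North West', 'GT': 'Gauteng', 'MP': 'Mpumalanga',
-- }
--
--
-- def _determine_province_from_code(municipality_code: str) -> str:
--     try:
--         province = _PROVINCES_3.get(municipality_code[:3])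
--         if province is not None:
--             return province
--         return _PROVINCES_2.get(municipality_code[:2], 'Unknown Province')
--     except Exception:
--         return 'Unknown Province'
-- ===== Notes on version B (the rewrite author's own statement) =====
-- stated objective: simpler
-- what changed: Replaces the linear startswith scan over the 16-entry prefix table (plus its dead elif fallback chain) with two constant lookups: code[:3] in a 3-char dict, then code[:2] in a 2-char dict; correct because no 2-char key is a prefix of any 3-char key.
import Mathlib
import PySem

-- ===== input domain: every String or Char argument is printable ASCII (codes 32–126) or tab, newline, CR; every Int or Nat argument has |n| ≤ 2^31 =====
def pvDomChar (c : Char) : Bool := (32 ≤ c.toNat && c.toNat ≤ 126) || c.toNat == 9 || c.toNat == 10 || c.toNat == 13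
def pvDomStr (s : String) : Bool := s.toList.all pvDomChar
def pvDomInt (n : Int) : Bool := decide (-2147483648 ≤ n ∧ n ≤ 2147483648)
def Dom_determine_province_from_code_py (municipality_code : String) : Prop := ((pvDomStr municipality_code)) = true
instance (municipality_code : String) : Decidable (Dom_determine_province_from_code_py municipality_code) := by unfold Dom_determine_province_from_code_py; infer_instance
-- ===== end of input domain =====

-- B replaces A's linear startswith scan over a 16-entry prefix table (plus its dead
-- elif fallback) with two constant dict lookups on code[:3] and code[:2] (simpler).

-- ===== PORT A =====
-- the dict literal `province_codes` (insertion order)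
def pvProvinceCodes : List (String × String) :=
  [("WC", "Western Cape"),
   ("EC", "Eastern Cape"),
   ("NC", "Northern Cape"),
   ("FS", "Free State"),
   ("KZN", "KwaZulu-Natal"),
   ("NW", "North West"),
   ("GT", "Gauteng"),
   ("MP", "Mpumalanga"),
   ("LIM", "Limpopo"),
   ("CPT", "Western Cape"),
   ("JHB", "Gauteng"),
   ("ETH", "KwaZulu-Natal"),
   ("TSH", "Gauteng"),
   ("EKU", "Gauteng"),
   ("BUF", "Eastern Cape"),
   ("MAN", "Free State")]

def determine_province_from_code_py (municipality_code : String) : String :=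
  -- 'for code_prefix, province in province_codes.items(): if startswith: return province'
  match pvProvinceCodes.findSome?
      (fun kv => if PySem.Str.startswith municipality_code kv.1 then some kv.2 else none) with
  | some province => province
  | none =>
    -- the elif chain on full code patterns
    if PySem.Str.startswith municipality_code "WC" || PySem.Str.startswith municipality_code "CPT" then
      "Western Cape"
    else if PySem.Str.startswith municipality_code "EC" || PySem.Str.startswith municipality_code "BUF" then
      "Eastern Cape"
    else if PySem.Str.startswith municipality_code "NC" then
      "Northern Cape"
    else if PySem.Str.startswith municipality_code "FS" || PySem.Str.startswith municipality_code "MAN" then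
      "Free State"
    else if PySem.Str.startswith municipality_code "KZN" || PySem.Str.startswith municipality_code "ETH" then
      "KwaZulu-Natal"
    else if PySem.Str.startswith municipality_code "NW" then
      "North West"
    else if PySem.Str.startswith municipality_code "GT" || PySem.Str.startswith municipality_code "JHB" ||
            PySem.Str.startswith municipality_code "TSH" || PySem.Str.startswith municipality_code "EKU" then
      "Gauteng"
    else if PySem.Str.startswith municipality_code "MP" then
      "Mpumalanga"
    else if PySem.Str.startswith municipality_code "LIM" then
      "Limpopo"
    else
      "Unknown Province"

-- ===== PORT B =====
def pvProvinces3 : PySem.Dict String String :=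
  PySem.Dict.ofList
  [("KZN", "KwaZulu-Natal"),
   ("LIM", "Limpopo"),
   ("CPT", "Western Cape"),
   ("JHB", "Gauteng"),
   ("ETH", "KwaZulu-Natal"),
   ("TSH", "Gauteng"),
   ("EKU", "Gauteng"),
   ("BUF", "Eastern Cape"),
   ("MAN", "Free State")]

def pvProvinces2 : PySem.Dict String String :=
  PySem.Dict.ofList
  [("WC", "Western Cape"),
   ("EC", "Eastern Cape"),
   ("NC", "Northern Cape"),
   ("FS", "Free State"),
   ("NW", "North West"),
   ("GT", "Gauteng"),
   ("MP", "Mpumalanga")]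

def determine_province_from_code_py_alt (municipality_code : String) : String :=
  match pvProvinces3.get? (PySem.Str.slice municipality_code none (some 3)) with
  | some province => province
  | none => pvProvinces2.getD (PySem.Str.slice municipality_code none (some 2)) "Unknown Province"

-- ===== PRECONDITION & SPEC =====
def Spec_determine_province_from_code_py (municipality_code : String) (out : String) : Prop := out = determine_province_from_code_py_alt municipality_code
instance (municipality_code : String) (out : String) : Decidable (Spec_determine_province_from_code_py municipality_code out) := by unfold Spec_determine_province_from_code_py; infer_instance

-- ===== CLAIM (what is proved, stated in full; the proofs are below) =====
def Claim_equal_determine_province_from_code_py : Prop := ∀ (municipality_code : String), Dom_determine_province_from_code_py municipality_code → Spec_determine_province_from_code_py municipality_code (determine_province_from_code_py municipality_code)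

-- ===== LEMMAS AND PROOFS =====

lemma ofList_beq (s : String) (l : List Char) : (s == String.ofList l) = (s.toList == l) := by
  by_cases h : s.toList = l
  · subst h; simp [String.ofList_toList]
  · have h2 : s ≠ String.ofList l := by
      intro he; apply h; rw [he]; simp
    simp [h, h2]

lemma slice3 (l : List Char) :
    PySem.Str.slice (String.ofList l) none (some 3) = String.ofList (l.take 3) := by
  apply String.toList_inj.mp
  simp only [PySem.Str.toList_slice, PySem.Chars.slice_eq_listSlice, String.toList_ofList]
  rw [show (3:Int) = ((3:Nat):Int) from rfl, PySem.List.slice_to_natCast]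

lemma slice2 (l : List Char) :
    PySem.Str.slice (String.ofList l) none (some 2) = String.ofList (l.take 2) := by
  apply String.toList_inj.mp
  simp only [PySem.Str.toList_slice, PySem.Chars.slice_eq_listSlice, String.toList_ofList]
  rw [show (2:Int) = ((2:Nat):Int) from rfl, PySem.List.slice_to_natCast]

set_option maxHeartbeats 2000000 in
lemma pv_main (l : List Char) :
    determine_province_from_code_py (String.ofList l)
      = determine_province_from_code_py_alt (String.ofList l) := by
  rcases l with _ | ⟨a, _ | ⟨b, _ | ⟨c, r⟩⟩⟩
  · decide
  · -- [a]
    simp only [determine_province_from_code_py, determine_province_from_code_py_alt,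
      pvProvinceCodes, List.findSome?, slice3, slice2, List.take_succ_cons,
      List.take_nil]
    rw [show pvProvinces3 = PySem.Dict.mk [("KZN", "KwaZulu-Natal"), ("LIM", "Limpopo"), ("CPT", "Western Cape"), ("JHB", "Gauteng"), ("ETH", "KwaZulu-Natal"), ("TSH", "Gauteng"), ("EKU", "Gauteng"), ("BUF", "Eastern Cape"), ("MAN", "Free State")] from by decide,
        show pvProvinces2 = PySem.Dict.mk [("WC", "Western Cape"), ("EC", "Eastern Cape"), ("NC", "Northern Cape"), ("FS", "Free State"), ("NW", "North West"), ("GT", "Gauteng"), ("MP", "Mpumalanga")] from by decide]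
    simp only [PySem.Dict.getD_eq_get?_getD, PySem.Dict.get?_mk_cons, ofList_beq,
      PySem.Str.startswith_eq, String.toList_ofList]
    simp only [show "WC".toList = ['W', 'C'] from rfl, show "EC".toList = ['E', 'C'] from rfl, show "NC".toList = ['N', 'C'] from rfl, show "FS".toList = ['F', 'S'] from rfl, show "KZN".toList = ['K', 'Z', 'N'] from rfl, show "NW".toList = ['N', 'W'] from rfl, show "GT".toList = ['G', 'T'] from rfl, show "MP".toList = ['M', 'P'] from rfl, show "LIM".toList = ['L', 'I', 'M'] from rfl, show "CPT".toList = ['C', 'P', 'T'] from rfl, show "JHB".toList = ['J', 'H', 'B'] from rfl, show "ETH".toList = ['E', 'T', 'H'] from rfl, show "TSH".toList = ['T', 'S', 'H'] from rfl, show "EKU".toList = ['E', 'K', 'U'] from rfl, show "BUF".toList = ['B', 'U', 'F'] from rfl, show "MAN".toList = ['M', 'A', 'N'] from rfl]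
    simp only [PySem.Chars.startswith, List.isPrefixOf, List.cons_beq_cons,
      Bool.and_false, PySem.Dict.get?]
    simp []
  · -- [a, b]
    simp only [determine_province_from_code_py, determine_province_from_code_py_alt,
      pvProvinceCodes, List.findSome?, slice3, slice2, List.take_succ_cons,
      List.take_nil]
    rw [show pvProvinces3 = PySem.Dict.mk [("KZN", "KwaZulu-Natal"), ("LIM", "Limpopo"), ("CPT", "Western Cape"), ("JHB", "Gauteng"), ("ETH", "KwaZulu-Natal"), ("TSH", "Gauteng"), ("EKU", "Gauteng"), ("BUF", "Eastern Cape"), ("MAN", "Free State")] from by decide,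
        show pvProvinces2 = PySem.Dict.mk [("WC", "Western Cape"), ("EC", "Eastern Cape"), ("NC", "Northern Cape"), ("FS", "Free State"), ("NW", "North West"), ("GT", "Gauteng"), ("MP", "Mpumalanga")] from by decide]
    simp only [PySem.Dict.getD_eq_get?_getD, PySem.Dict.get?_mk_cons, ofList_beq,
      PySem.Str.startswith_eq, String.toList_ofList]
    simp only [show "WC".toList = ['W', 'C'] from rfl, show "EC".toList = ['E', 'C'] from rfl, show "NC".toList = ['N', 'C'] from rfl, show "FS".toList = ['F', 'S'] from rfl, show "KZN".toList = ['K', 'Z', 'N'] from rfl, show "NW".toList = ['N', 'W'] from rfl, show "GT".toList = ['G', 'T'] from rfl, show "MP".toList = ['M', 'P'] from rfl, show "LIM".toList = ['L', 'I', 'M'] from rfl, show "CPT".toList = ['C', 'P', 'T'] from rfl, show "JHB".toList = ['J', 'H', 'B'] from rfl, show "ETH".toList = ['E', 'T', 'H'] from rfl, show "TSH".toList = ['T', 'S', 'H'] from rfl, show "EKU".toList = ['E', 'K', 'U'] from rfl, show "BUF".toList = ['B', 'U', 'F'] from rfl, show "MAN".toList = ['M', 'A', 'N'] from rfl]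
    simp only [PySem.Chars.startswith, List.isPrefixOf, List.cons_beq_cons,
      Bool.and_true, Bool.and_false, PySem.Dict.get?]
    by_cases hWC : ('W' == a && 'C' == b) = true
    · simp only [Bool.and_eq_true, beq_iff_eq] at hWC
      obtain ⟨rfl, rfl⟩ := hWC
      simp
    by_cases hEC : ('E' == a && 'C' == b) = true
    · simp only [Bool.and_eq_true, beq_iff_eq] at hEC
      obtain ⟨rfl, rfl⟩ := hEC
      simp
    by_cases hNC : ('N' == a && 'C' == b) = true
    · simp only [Bool.and_eq_true, beq_iff_eq] at hNC
      obtain ⟨rfl, rfl⟩ := hNC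
      simp
    by_cases hFS : ('F' == a && 'S' == b) = true
    · simp only [Bool.and_eq_true, beq_iff_eq] at hFS
      obtain ⟨rfl, rfl⟩ := hFS
      simp
    by_cases hNW : ('N' == a && 'W' == b) = true
    · simp only [Bool.and_eq_true, beq_iff_eq] at hNW
      obtain ⟨rfl, rfl⟩ := hNW
      simp
    by_cases hGT : ('G' == a && 'T' == b) = true
    · simp only [Bool.and_eq_true, beq_iff_eq] at hGT
      obtain ⟨rfl, rfl⟩ := hGT
      simp
    by_cases hMP : ('M' == a && 'P' == b) = true
    · simp only [Bool.and_eq_true, beq_iff_eq] at hMP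
      obtain ⟨rfl, rfl⟩ := hMP
      simp
    simp [hWC, hEC, hNC, hFS, hNW, hGT, hMP]
  · -- a :: b :: c :: r
    simp only [determine_province_from_code_py, determine_province_from_code_py_alt,
      pvProvinceCodes, List.findSome?, slice3, slice2, List.take_succ_cons, List.take_zero,
      ]
    rw [show pvProvinces3 = PySem.Dict.mk [("KZN", "KwaZulu-Natal"), ("LIM", "Limpopo"), ("CPT", "Western Cape"), ("JHB", "Gauteng"), ("ETH", "KwaZulu-Natal"), ("TSH", "Gauteng"), ("EKU", "Gauteng"), ("BUF", "Eastern Cape"), ("MAN", "Free State")] from by decide,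
        show pvProvinces2 = PySem.Dict.mk [("WC", "Western Cape"), ("EC", "Eastern Cape"), ("NC", "Northern Cape"), ("FS", "Free State"), ("NW", "North West"), ("GT", "Gauteng"), ("MP", "Mpumalanga")] from by decide]
    simp only [PySem.Dict.getD_eq_get?_getD, PySem.Dict.get?_mk_cons, ofList_beq,
      PySem.Str.startswith_eq, String.toList_ofList]
    simp only [show "WC".toList = ['W', 'C'] from rfl, show "EC".toList = ['E', 'C'] from rfl, show "NC".toList = ['N', 'C'] from rfl, show "FS".toList = ['F', 'S'] from rfl, show "KZN".toList = ['K', 'Z', 'N'] from rfl, show "NW".toList = ['N', 'W'] from rfl, show "GT".toList = ['G', 'T'] from rfl, show "MP".toList = ['M', 'P'] from rfl, show "LIM".toList = ['L', 'I', 'M'] from rfl, show "CPT".toList = ['C', 'P', 'T'] from rfl, show "JHB".toList = ['J', 'H', 'B'] from rfl, show "ETH".toList = ['E', 'T', 'H'] from rfl, show "TSH".toList = ['T', 'S', 'H'] from rfl, show "EKU".toList = ['E', 'K', 'U'] from rfl, show "BUF".toList = ['B', 'U', 'F'] from rfl, show "MAN".toList = ['M', 'A', 'N'] from rfl]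
    simp only [PySem.Chars.startswith, List.isPrefixOf, List.cons_beq_cons,
      Bool.and_true, PySem.Dict.get?]
    by_cases hWC : ('W' == a && 'C' == b) = true
    · simp only [Bool.and_eq_true, beq_iff_eq] at hWC
      obtain ⟨rfl, rfl⟩ := hWC
      simp
    by_cases hEC : ('E' == a && 'C' == b) = true
    · simp only [Bool.and_eq_true, beq_iff_eq] at hEC
      obtain ⟨rfl, rfl⟩ := hEC
      simp
    by_cases hNC : ('N' == a && 'C' == b) = true
    · simp only [Bool.and_eq_true, beq_iff_eq] at hNC
      obtain ⟨rfl, rfl⟩ := hNC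
      simp
    by_cases hFS : ('F' == a && 'S' == b) = true
    · simp only [Bool.and_eq_true, beq_iff_eq] at hFS
      obtain ⟨rfl, rfl⟩ := hFS
      simp
    by_cases hKZN : ('K' == a && ('Z' == b && 'N' == c)) = true
    · simp only [Bool.and_eq_true, beq_iff_eq] at hKZN
      obtain ⟨rfl, rfl, rfl⟩ := hKZN
      simp
    by_cases hNW : ('N' == a && 'W' == b) = true
    · simp only [Bool.and_eq_true, beq_iff_eq] at hNW
      obtain ⟨rfl, rfl⟩ := hNW
      simp
    by_cases hGT : ('G' == a && 'T' == b) = true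
    · simp only [Bool.and_eq_true, beq_iff_eq] at hGT
      obtain ⟨rfl, rfl⟩ := hGT
      simp
    by_cases hMP : ('M' == a && 'P' == b) = true
    · simp only [Bool.and_eq_true, beq_iff_eq] at hMP
      obtain ⟨rfl, rfl⟩ := hMP
      simp
    by_cases hLIM : ('L' == a && ('I' == b && 'M' == c)) = true
    · simp only [Bool.and_eq_true, beq_iff_eq] at hLIM
      obtain ⟨rfl, rfl, rfl⟩ := hLIM
      simp
    by_cases hCPT : ('C' == a && ('P' == b && 'T' == c)) = true
    · simp only [Bool.and_eq_true, beq_iff_eq] at hCPT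
      obtain ⟨rfl, rfl, rfl⟩ := hCPT
      simp
    by_cases hJHB : ('J' == a && ('H' == b && 'B' == c)) = true
    · simp only [Bool.and_eq_true, beq_iff_eq] at hJHB
      obtain ⟨rfl, rfl, rfl⟩ := hJHB
      simp
    by_cases hETH : ('E' == a && ('T' == b && 'H' == c)) = true
    · simp only [Bool.and_eq_true, beq_iff_eq] at hETH
      obtain ⟨rfl, rfl, rfl⟩ := hETH
      simp
    by_cases hTSH : ('T' == a && ('S' == b && 'H' == c)) = true
    · simp only [Bool.and_eq_true, beq_iff_eq] at hTSH
      obtain ⟨rfl, rfl, rfl⟩ := hTSH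
      simp
    by_cases hEKU : ('E' == a && ('K' == b && 'U' == c)) = true
    · simp only [Bool.and_eq_true, beq_iff_eq] at hEKU
      obtain ⟨rfl, rfl, rfl⟩ := hEKU
      simp
    by_cases hBUF : ('B' == a && ('U' == b && 'F' == c)) = true
    · simp only [Bool.and_eq_true, beq_iff_eq] at hBUF
      obtain ⟨rfl, rfl, rfl⟩ := hBUF
      simp
    by_cases hMAN : ('M' == a && ('A' == b && 'N' == c)) = true
    · simp only [Bool.and_eq_true, beq_iff_eq] at hMAN
      obtain ⟨rfl, rfl, rfl⟩ := hMAN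
      simp
    simp [hWC, hEC, hNC, hFS, hKZN, hNW, hGT, hMP, hLIM, hCPT, hJHB, hETH, hTSH, hEKU, hBUF, hMAN]

-- ===== VERDICT (by name: the statement is the Claim_ definition above) =====
theorem determine_province_from_code_py_spec : Claim_equal_determine_province_from_code_py := by
  intro mc _
  unfold Spec_determine_province_from_code_py
  have h := pv_main mc.toList
  simpa [String.ofList_toList] using h
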